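-- pv_equiv track=rewrite | github.com/pypi-data/pypi-mirror-12 | packages/pemjh/pemjh-0.0.1.zip/pemjh-0.0.1/src/pemjh/challenge148/__init__.py | get_non_7s
-- ===== SOURCE A (Python) =====
-- def get_biggest_triangle(row):
--     current = row
--     power = 0
--     while 7 <= current:
--         current //= 7
--         power += 1
--
--     return power
--
-- def get_non_7s(row):
--     if row <= 7:
--         return (row * (row + 1)) // 2
--
--     # Get the biggest power 7 triangle
--     big_triangle_power = get_biggest_triangle(row)
--
--     # How many in the big triangle?
--     big_triangle = 28**big_triangle_power
--
--     # How many complete rows?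
--     complete_rows = row // (7**big_triangle_power)
--
--     # How many extra rows?
--     extra_rows = row % (7**big_triangle_power)
--
--     # How many partial big triangles in the incomplete row?
--     incomplete_triangles = complete_rows + 1
--
--     return get_non_7s(complete_rows) * big_triangle + incomplete_triangles * \
--         get_non_7s(extra_rows)
-- ===== SOURCE B (Python) =====
-- def get_non_7s(row):
--     if row <= 7:
--         return (row * (row + 1)) // 2
--     # base-7 digits of row, most significant first
--     digits = []
--     n = row
--     while n:
--         digits = [n % 7] + digits
--         n //= 7
--     # one pass over the digits: accumulate each leading digit's triangle,
--     # weighted by 28**power and the running product of (digit + 1) factors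
--     total = 0
--     mult = 1
--     power = len(digits)
--     for d in digits:
--         power -= 1
--         if d:
--             total += mult * (d * (d + 1) // 2) * 28 ** power
--             mult *= d + 1
--     return total
-- ===== Notes on version B (the rewrite author's own statement) =====
-- stated objective: alternative
-- what changed: Replaced A's recursive divide-and-conquer (repeated largest-power-of-seven search plus two recursive calls per level) by a single iterative pass over the base-seven digits of row, accumulating each leading digit's triangle contribution with the appropriate power weight and a running product of incremented-digit factors.
import Mathlib
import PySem

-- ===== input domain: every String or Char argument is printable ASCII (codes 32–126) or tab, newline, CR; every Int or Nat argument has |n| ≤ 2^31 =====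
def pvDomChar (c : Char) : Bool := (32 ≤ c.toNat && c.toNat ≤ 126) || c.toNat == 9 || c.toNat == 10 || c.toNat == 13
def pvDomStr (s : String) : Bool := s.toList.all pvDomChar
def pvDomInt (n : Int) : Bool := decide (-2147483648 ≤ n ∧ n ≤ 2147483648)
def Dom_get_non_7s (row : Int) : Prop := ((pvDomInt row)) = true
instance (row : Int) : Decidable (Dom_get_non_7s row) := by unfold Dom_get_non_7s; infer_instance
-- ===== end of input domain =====

-- B replaces A's recursion on the largest power-of-7 block by one pass over the base-7 digits (alternative decomposition, same values).

-- ===== PORT A =====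
-- while loop of get_biggest_triangle, with fuel (row.toNat+1 iterations always suffice: current strictly shrinks)
def gbtLoop : Nat → Int → Int → Int
  | 0, _, power => power
  | f + 1, current, power =>
    if 7 ≤ current then gbtLoop f (PySem.Int.floordiv current 7) (power + 1) else power

def get_biggest_triangle (row : Int) : Int := gbtLoop (row.toNat + 1) row 0

-- recursion of get_non_7s, with fuel (each recursive call strictly decreases the nonnegative argument)
def aLoop : Nat → Int → Int
  | 0, _ => 0
  | f + 1, row =>
    if row ≤ 7 then PySem.Int.floordiv (row * (row + 1)) 2
    else
      let big_triangle_power := get_biggest_triangle row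
      -- 28**big_triangle_power / 7**big_triangle_power: the exponent is ≥ 0 here, so ^ on toNat is exact
      let big_triangle : Int := 28 ^ big_triangle_power.toNat
      let complete_rows := PySem.Int.floordiv row (7 ^ big_triangle_power.toNat)
      let extra_rows := PySem.Int.mod row (7 ^ big_triangle_power.toNat)
      let incomplete_triangles := complete_rows + 1
      aLoop f complete_rows * big_triangle + incomplete_triangles * aLoop f extra_rows

def get_non_7s (row : Int) : Int := aLoop (row.toNat + 1) row

-- ===== PORT B =====
-- while n: digits = [n % 7] + digits; n //= 7   (fuel; row.toNat+1 iterations suffice)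
def bDigits : Nat → Int → List Int → List Int
  | 0, _, digits => digits
  | f + 1, n, digits =>
    if n ≠ 0 then bDigits f (PySem.Int.floordiv n 7) (PySem.Int.mod n 7 :: digits) else digits

-- for d in digits: power -= 1; if d: total += mult * (d*(d+1)//2) * 28**power; mult *= d+1
-- (power starts at len(digits) and stays ≥ 0 inside the loop, so ^ on toNat is exact)
def bLoop : List Int → Int → Int → Int → Int
  | [], total, _, _ => total
  | d :: ds, total, mult, power =>
    let power' := power - 1
    if d ≠ 0 then
      bLoop ds (total + mult * PySem.Int.floordiv (d * (d + 1)) 2 * 28 ^ power'.toNat)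
        (mult * (d + 1)) power'
    else
      bLoop ds total mult power'

def get_non_7s_alt (row : Int) : Int :=
  if row ≤ 7 then PySem.Int.floordiv (row * (row + 1)) 2
  else
    let digits := bDigits (row.toNat + 1) row []
    bLoop digits 0 1 (digits.length : Int)

-- ===== PRECONDITION & SPEC =====
def Spec_get_non_7s (row : Int) (out : Int) : Prop := out = get_non_7s_alt row
instance (row : Int) (out : Int) : Decidable (Spec_get_non_7s row out) := by unfold Spec_get_non_7s; infer_instance

-- ===== CLAIM (what is proved, stated in full; the proofs are below) =====
def Claim_equal_get_non_7s : Prop := ∀ (row : Int), Dom_get_non_7s row → Spec_get_non_7s row (get_non_7s row)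

-- ===== LEMMAS AND PROOFS =====

-- triangle of x, as both ports compute it
def triInt (x : Int) : Int := PySem.Int.floordiv (x * (x + 1)) 2

-- reference functions by least-significant-digit recursion:
-- refM n = product of (digit+1) over base-7 digits of n; refF n = the common value of both ports
def refM (n : Nat) : Int :=
  if n = 0 then 1 else refM (n / 7) * ((n % 7 : Nat) + 1 : Int)
  termination_by n
  decreasing_by exact Nat.div_lt_self (by omega) (by omega)

def refF (n : Nat) : Int :=
  if n = 0 then 0 else 28 * refF (n / 7) + refM (n / 7) * triInt ((n % 7 : Nat) : Int)
  termination_by n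
  decreasing_by exact Nat.div_lt_self (by omega) (by omega)

theorem refF_zero : refF 0 = 0 := by simp [refF]

theorem refM_zero : refM 0 = 1 := by simp [refM]

theorem triInt_zero : triInt 0 = 0 := by decide

theorem refF_small (n : Nat) (h : n ≤ 7) : refF n = triInt (n : Int) := by
  interval_cases n <;> simp [refF, refM, triInt, PySem.Int.floordiv]

theorem gbtLoop_eq (f : Nat) : ∀ (c pw : Int), 0 ≤ c → c.toNat < f →
    gbtLoop f c pw = pw + (Nat.log 7 c.toNat : Int) := by
  induction f with
  | zero => intro c pw hc h; omega
  | succ f ih =>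
    intro c pw hc h
    obtain ⟨m, rfl⟩ : ∃ m : Nat, c = (m : Int) := ⟨c.toNat, by omega⟩
    simp only [Int.toNat_natCast] at h
    by_cases h7 : (7 : Int) ≤ (m : Int)
    · rw [gbtLoop, if_pos h7]
      have hm7 : 7 ≤ m := by exact_mod_cast h7
      have hdiv : PySem.Int.floordiv (m : Int) 7 = ((m / 7 : Nat) : Int) := by
        exact_mod_cast PySem.Int.floordiv_natCast m 7
      rw [hdiv, ih _ _ (by positivity) (by simp; omega)]
      simp only [Int.toNat_natCast]
      have h1 : Nat.log 7 (m / 7) = Nat.log 7 m - 1 := Nat.log_div_base 7 m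
      have h2 : 0 < Nat.log 7 m := Nat.log_pos (by norm_num) hm7
      omega
    · rw [gbtLoop, if_neg h7]
      have hm7 : m < 7 := by omega
      simp only [Int.toNat_natCast]
      rw [Nat.log_of_lt hm7]
      simp

theorem msb (p : Nat) : ∀ n : Nat, 7 ^ p ≤ n → n < 7 ^ (p + 1) →
    refF n = triInt ((n / 7 ^ p : Nat) : Int) * 28 ^ p
        + ((n / 7 ^ p : Nat) + 1 : Int) * refF (n % 7 ^ p)
    ∧ refM n = ((n / 7 ^ p : Nat) + 1 : Int) * refM (n % 7 ^ p) := by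
  induction p with
  | zero =>
    intro n hlo hhi
    simp only [pow_zero, Nat.div_one, Nat.mod_one] at *
    have hn0 : n ≠ 0 := by omega
    have hdiv : n / 7 = 0 := Nat.div_eq_of_lt hhi
    have hmod : n % 7 = n := Nat.mod_eq_of_lt hhi
    constructor
    · rw [refF, if_neg hn0, hdiv, hmod, refF_zero, refM_zero]; ring
    · rw [refM, if_neg hn0, hdiv, hmod, refM_zero]; ring
  | succ p ih =>
    intro n hlo hhi
    have hPpos : 0 < 7 ^ p := pow_pos (by omega) p
    have hd7 : n % 7 < 7 := Nat.mod_lt _ (by omega)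
    have hnm : 7 * (n / 7) + n % 7 = n := Nat.div_add_mod n 7
    have hmlo : 7 ^ p ≤ n / 7 := by
      rw [Nat.le_div_iff_mul_le (by omega)]
      rw [pow_succ] at hlo; exact hlo
    have hmhi : n / 7 < 7 ^ (p + 1) := by
      rw [Nat.div_lt_iff_lt_mul (by omega)]
      rw [pow_succ 7 (p + 1)] at hhi; exact hhi
    obtain ⟨ihF, ihM⟩ := ih (n / 7) hmlo hmhi
    have h3 : 7 ^ p * (n / 7 / 7 ^ p) + n / 7 % 7 ^ p = n / 7 := Nat.div_add_mod _ _
    have hr' : n / 7 % 7 ^ p < 7 ^ p := Nat.mod_lt _ hPpos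
    have hn' : n = 7 ^ (p + 1) * (n / 7 / 7 ^ p) + (7 * (n / 7 % 7 ^ p) + n % 7) := by
      rw [pow_succ]
      calc n = 7 * (7 ^ p * (n / 7 / 7 ^ p) + n / 7 % 7 ^ p) + n % 7 := by rw [h3]; omega
        _ = 7 ^ p * 7 * (n / 7 / 7 ^ p) + (7 * (n / 7 % 7 ^ p) + n % 7) := by ring
    have hlt : 7 * (n / 7 % 7 ^ p) + n % 7 < 7 ^ (p + 1) := by
      rw [pow_succ]; omega
    have e1 : n / 7 ^ (p + 1) = n / 7 / 7 ^ p := by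
      rw [pow_succ, mul_comm, Nat.div_div_eq_div_mul]
    have e2 : n % 7 ^ (p + 1) = 7 * (n / 7 % 7 ^ p) + n % 7 := by
      conv_lhs => rw [hn']
      rw [Nat.mul_add_mod, Nat.mod_eq_of_lt hlt]
    have hn0 : n ≠ 0 := by omega
    have hFn : refF n = 28 * refF (n / 7) + refM (n / 7) * triInt ((n % 7 : Nat) : Int) := by
      rw [refF, if_neg hn0]
    have hMn : refM n = refM (n / 7) * ((n % 7 : Nat) + 1 : Int) := by
      rw [refM, if_neg hn0]
    have hFr : refF (7 * (n / 7 % 7 ^ p) + n % 7)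
        = 28 * refF (n / 7 % 7 ^ p) + refM (n / 7 % 7 ^ p) * triInt ((n % 7 : Nat) : Int) := by
      by_cases hz : 7 * (n / 7 % 7 ^ p) + n % 7 = 0
      · have h1 : n / 7 % 7 ^ p = 0 := by omega
        have h2 : n % 7 = 0 := by omega
        rw [hz, h1, h2]
        simp [refF_zero, refM_zero, triInt_zero]
      · rw [refF, if_neg hz]
        have hq : (7 * (n / 7 % 7 ^ p) + n % 7) / 7 = n / 7 % 7 ^ p := by omega
        have hm : (7 * (n / 7 % 7 ^ p) + n % 7) % 7 = n % 7 := by omega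
        rw [hq, hm]
    have hMr : refM (7 * (n / 7 % 7 ^ p) + n % 7)
        = refM (n / 7 % 7 ^ p) * ((n % 7 : Nat) + 1 : Int) := by
      by_cases hz : 7 * (n / 7 % 7 ^ p) + n % 7 = 0
      · have h1 : n / 7 % 7 ^ p = 0 := by omega
        have h2 : n % 7 = 0 := by omega
        rw [hz, h1, h2]
        simp [refM_zero]
      · rw [refM, if_neg hz]
        have hq : (7 * (n / 7 % 7 ^ p) + n % 7) / 7 = n / 7 % 7 ^ p := by omega
        have hm : (7 * (n / 7 % 7 ^ p) + n % 7) % 7 = n % 7 := by omega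
        rw [hq, hm]
    refine ⟨?_, ?_⟩
    · rw [hFn, ihF, ihM, e1, e2, hFr]; push_cast; ring
    · rw [hMn, ihM, e1, e2, hMr]; push_cast; ring

theorem aLoop_eq (f : Nat) : ∀ n : Nat, n < f → aLoop f (n : Int) = refF n := by
  induction f with
  | zero => intro n hn; omega
  | succ f ih =>
    intro n hn
    by_cases hn7 : n ≤ 7
    · rw [aLoop, if_pos (by exact_mod_cast hn7 : (n : Int) ≤ 7), refF_small n hn7]
      rfl
    · replace hn7 : 7 < n := by omega
      have hnpos : 0 < n := by omega
      have hL1 : 7 ^ Nat.log 7 n ≤ n := Nat.pow_log_le_self 7 (by omega)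
      have hL2 : n < 7 ^ (Nat.log 7 n + 1) := Nat.lt_pow_succ_log_self (by norm_num) n
      have hLpos : 1 ≤ Nat.log 7 n := Nat.log_pos (by norm_num) (by omega)
      have hPgt : 1 < 7 ^ Nat.log 7 n := by
        calc 1 < 7 ^ 1 := by norm_num
          _ ≤ 7 ^ Nat.log 7 n := Nat.pow_le_pow_right (by omega) hLpos
      have hgbt : get_biggest_triangle (n : Int) = (Nat.log 7 n : Int) := by
        unfold get_biggest_triangle
        rw [gbtLoop_eq _ _ _ (by positivity) (by simp)]
        simp
      have hq7 : n / 7 ^ Nat.log 7 n < 7 := by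
        rw [Nat.div_lt_iff_lt_mul (by omega)]
        rw [pow_succ] at hL2; omega
      have hqlt : n / 7 ^ Nat.log 7 n < n := Nat.div_lt_self hnpos hPgt
      have hrlt : n % 7 ^ Nat.log 7 n < n := by
        have := Nat.mod_lt n (show 0 < 7 ^ Nat.log 7 n by omega)
        omega
      have hpow : ((7 : Int) ^ Nat.log 7 n) = ((7 ^ Nat.log 7 n : Nat) : Int) := by push_cast; ring
      have hdiv : PySem.Int.floordiv (n : Int) ((7 ^ Nat.log 7 n : Nat) : Int)
          = ((n / 7 ^ Nat.log 7 n : Nat) : Int) := PySem.Int.floordiv_natCast _ _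
      have hmod : PySem.Int.mod (n : Int) ((7 ^ Nat.log 7 n : Nat) : Int)
          = ((n % 7 ^ Nat.log 7 n : Nat) : Int) := PySem.Int.mod_natCast _ _
      rw [aLoop, if_neg (by omega)]
      simp only [hgbt, Int.toNat_natCast, hpow, hdiv, hmod]
      rw [ih _ (by omega), ih _ (by omega)]
      rw [(msb (Nat.log 7 n) n hL1 hL2).1, refF_small _ (by omega)]

theorem bLoop_linear (ds : List Int) : ∀ total mult power,
    bLoop ds total mult power = total + mult * bLoop ds 0 1 power := by
  induction ds with
  | nil => intro t m p; simp [bLoop]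
  | cons d ds ih =>
    intro t m p
    simp only [bLoop]
    split_ifs with hd
    · rw [ih, ih (0 + 1 * PySem.Int.floordiv (d * (d + 1)) 2 * 28 ^ (p - 1).toNat)]
      ring
    · rw [ih, ih 0]

theorem bDigits_eq (f : Nat) : ∀ (n : Nat) (acc : List Int), n < f →
    bLoop (bDigits f (n : Int) acc) 0 1 ((bDigits f (n : Int) acc).length : Int)
      = 28 ^ acc.length * refF n + refM n * bLoop acc 0 1 (acc.length : Int) := by
  induction f with
  | zero => intro n acc hn; omega
  | succ f ih =>
    intro n acc hn
    by_cases hz : n = 0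
    · subst hz
      simp only [Nat.cast_zero, bDigits, ne_eq, not_true_eq_false]
      rw [refF_zero, refM_zero]
      simp
    · have hcond : ((n : Int) ≠ 0) := by exact_mod_cast hz
      have hdiv : PySem.Int.floordiv (n : Int) 7 = ((n / 7 : Nat) : Int) := by
        exact_mod_cast PySem.Int.floordiv_natCast n 7
      have hmod : PySem.Int.mod (n : Int) 7 = ((n % 7 : Nat) : Int) := by
        exact_mod_cast PySem.Int.mod_natCast n 7
      rw [bDigits, if_pos hcond, hdiv, hmod]
      rw [ih (n / 7) (((n % 7 : Nat) : Int) :: acc) (by omega)]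
      have hFn : refF n = 28 * refF (n / 7) + refM (n / 7) * triInt ((n % 7 : Nat) : Int) := by
        rw [refF, if_neg hz]
      have hMn : refM n = refM (n / 7) * ((n % 7 : Nat) + 1 : Int) := by
        rw [refM, if_neg hz]
      simp only [List.length_cons, bLoop]
      have hp : ((acc.length + 1 : Nat) : Int) - 1 = (acc.length : Int) := by push_cast; ring
      rw [hp]
      simp only [Int.toNat_natCast]
      split_ifs with hd
      · rw [bLoop_linear, hFn, hMn]
        have hT : PySem.Int.floordiv (((n % 7 : Nat) : Int) * (((n % 7 : Nat) : Int) + 1)) 2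
            = triInt ((n % 7 : Nat) : Int) := rfl
        rw [hT]
        push_cast
        ring
      · have hd0 : ((n % 7 : Nat) : Int) = 0 := by omega
        rw [hFn, hMn, hd0, triInt_zero]
        push_cast [hd0]
        ring

-- ===== VERDICT (by name: the statement is the Claim_ definition above) =====
theorem get_non_7s_spec : Claim_equal_get_non_7s := by
  intro row _
  show get_non_7s row = get_non_7s_alt row
  by_cases h : row ≤ 7
  · unfold get_non_7s get_non_7s_alt
    rw [aLoop, if_pos h, if_pos h]
  · replace h : 7 < row := by omega
    have hrow : row = ((row.toNat : Nat) : Int) := by omega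
    rw [hrow]
    have hn7 : 7 < row.toNat := by omega
    have hA : get_non_7s ((row.toNat : Nat) : Int) = refF row.toNat := by
      unfold get_non_7s
      simp only [Int.toNat_natCast]
      exact aLoop_eq _ _ (by omega)
    have hB : get_non_7s_alt ((row.toNat : Nat) : Int) = refF row.toNat := by
      unfold get_non_7s_alt
      rw [if_neg (by omega)]
      simp only [Int.toNat_natCast]
      have := bDigits_eq (row.toNat + 1) row.toNat [] (by omega)
      simp only [List.length_nil, bLoop, pow_zero] at this
      rw [this]
      ring
    rw [hA, hB]
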